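-- pv_equiv track=rewrite | github.com/cms-flaf/FLAF | AnaProd/AnaTupleFileList.py | ToRunLumiRanges
-- ===== SOURCE A (Python) =====
-- def ToRunLumiRanges(run_lumi):
--     """Convert {run: set_of_lumis} to the [[start, end], ...] range format used in JSON output."""
--     run_lumi_ranges = {}
--     for run, lumis in run_lumi.items():
--         if len(lumis) == 0:
--             continue
--         sorted_lumis = sorted(lumis)
--         lumi_ranges = []
--         current_range = [sorted_lumis[0], sorted_lumis[0]]
--         for lumi in sorted_lumis[1:]:
--             if lumi == current_range[1] + 1:
--                 current_range[1] = lumi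
--             else:
--                 lumi_ranges.append(current_range)
--                 current_range = [lumi, lumi]
--         lumi_ranges.append(current_range)
--         run_lumi_ranges[run] = lumi_ranges
--     return run_lumi_ranges
-- ===== SOURCE B (Python) =====
-- def ToRunLumiRanges(run_lumi):
--     """Convert {run: set_of_lumis} to the [[start, end], ...] range format used in JSON output."""
--     run_lumi_ranges = {}
--     for run, lumis in run_lumi.items():
--         if not lumis:
--             continue
--         s = sorted(lumis)
--         starts = [v for v in s if v - 1 not in lumis]
--         ends = [v for v in s if v + 1 not in lumis]
--         run_lumi_ranges[run] = [[a, b] for a, b in zip(starts, ends)]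
--     return run_lumi_ranges
-- ===== Notes on version B (the rewrite author's own statement) =====
-- stated objective: alternative
-- what changed: Range boundaries are computed by set-membership tests on the sorted lumis (v is a range start iff v-1 is not in the set, a range end iff v+1 is not) and the two boundary lists are zipped into [start,end] pairs, replacing A's stateful left-to-right scan that mutates a current_range accumulator.
-- outside the precondition, e.g. on ToRunLumiRanges({'a': [1, 1, 2]}): A returns {'a': [[1, 1], [1, 2]]}, B returns {'a': [[1, 2]]}
import Mathlib
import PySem

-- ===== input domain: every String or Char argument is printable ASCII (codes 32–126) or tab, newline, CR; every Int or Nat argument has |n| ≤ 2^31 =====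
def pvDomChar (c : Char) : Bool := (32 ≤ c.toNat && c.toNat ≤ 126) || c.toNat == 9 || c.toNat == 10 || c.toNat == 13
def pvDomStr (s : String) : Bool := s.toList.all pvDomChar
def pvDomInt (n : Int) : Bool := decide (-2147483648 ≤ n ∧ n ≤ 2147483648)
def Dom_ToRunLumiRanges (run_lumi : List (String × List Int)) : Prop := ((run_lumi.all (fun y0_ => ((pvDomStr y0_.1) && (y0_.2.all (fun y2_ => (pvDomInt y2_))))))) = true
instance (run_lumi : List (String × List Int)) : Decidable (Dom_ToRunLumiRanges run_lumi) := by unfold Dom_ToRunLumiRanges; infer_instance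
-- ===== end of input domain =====

-- B finds each range boundary by a set-membership test (v-1 ∉ set → start, v+1 ∉ set → end) and zips
-- the boundary lists, instead of A's stateful scan with a current_range accumulator; same cost, alternative algorithm.

-- ===== PORT A =====
-- body of A's inner loop: state = (lumi_ranges, current_range[0], current_range[1])
def pvChunkStepA (st : List (List Int) × Int × Int) (lumi : Int) : List (List Int) × Int × Int :=
  if lumi = st.2.2 + 1 then (st.1, st.2.1, lumi)
  else (st.1 ++ [[st.2.1, st.2.2]], lumi, lumi)

-- body of A's outer loop, one (run, lumis) item
def pvStepA (d : PySem.Dict String (List (List Int))) (p : String × List Int) :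
    PySem.Dict String (List (List Int)) :=
  if p.2.length = 0 then d
  else
    match PySem.List.sorted p.2 (fun x => x) false with
    | [] => d  -- unreachable: sorted of a nonempty list is nonempty
    | x :: rest =>
      let st := rest.foldl pvChunkStepA ([], x, x)
      d.insert p.1 (st.1 ++ [[st.2.1, st.2.2]])

def ToRunLumiRanges (run_lumi : List (String × List Int)) : List (String × List (List Int)) :=
  (run_lumi.foldl pvStepA PySem.Dict.empty).items

-- ===== PORT B =====
-- body of B's loop, one (run, lumis) item
def pvStepB (d : PySem.Dict String (List (List Int))) (p : String × List Int) :
    PySem.Dict String (List (List Int)) :=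
  if p.2 = [] then d
  else
    let s := PySem.List.sorted p.2 (fun x => x) false
    let starts := s.filter (fun v => !(p.2.contains (v - 1)))
    let ends := s.filter (fun v => !(p.2.contains (v + 1)))
    d.insert p.1 (List.zipWith (fun a b => [a, b]) starts ends)

def ToRunLumiRanges_alt (run_lumi : List (String × List Int)) : List (String × List (List Int)) :=
  (run_lumi.foldl pvStepB PySem.Dict.empty).items

-- ===== PRECONDITION & SPEC =====
-- Each run's lumi collection is a Python set, so its List Int model holds distinct elements; Pre_
-- states exactly that (duplicate-bearing lists model no Python set, and there the two constructions differ).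
def Pre_ToRunLumiRanges (run_lumi : List (String × List Int)) : Prop :=
  ∀ p ∈ run_lumi, p.2.Nodup
instance (run_lumi : List (String × List Int)) : Decidable (Pre_ToRunLumiRanges run_lumi) := by
  unfold Pre_ToRunLumiRanges; infer_instance
def pvWitness_ToRunLumiRanges : (List (String × List Int)) := [("316000", [7, 8, 9, 12]), ("316001", [])]

def Spec_ToRunLumiRanges (run_lumi : List (String × List Int)) (out : List (String × List (List Int))) : Prop := out = ToRunLumiRanges_alt run_lumi
instance (run_lumi : List (String × List Int)) (out : List (String × List (List Int))) : Decidable (Spec_ToRunLumiRanges run_lumi out) := by unfold Spec_ToRunLumiRanges; infer_instance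

-- ===== CLAIM (what is proved, stated in full; the proofs are below) =====
def Claim_equal_ToRunLumiRanges : Prop := ∀ (run_lumi : List (String × List Int)), Dom_ToRunLumiRanges run_lumi → Pre_ToRunLumiRanges run_lumi → Spec_ToRunLumiRanges run_lumi (ToRunLumiRanges run_lumi)

-- ===== LEMMAS AND PROOFS =====

-- the common chunk decomposition: maximal runs of consecutive integers, as [lo, hi] pairs
def pvChunks (lo hi : Int) : List Int → List (List Int)
  | [] => [[lo, hi]]
  | y :: ys => if y = hi + 1 then pvChunks lo y ys else [lo, hi] :: pvChunks y y ys

-- boundary predicates evaluate from membership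
theorem pvPredTrue (s : List Int) (a : Int) (h : a ∉ s) : (!(s.contains a)) = true := by simp [h]
theorem pvPredFalse (s : List Int) (a : Int) (h : a ∈ s) : (!(s.contains a)) = false := by simp [h]

-- A's inner fold computes pvChunks
theorem pvFoldA_eq_chunks (rest : List Int) : ∀ (acc : List (List Int)) (lo hi : Int),
    (let st := rest.foldl pvChunkStepA (acc, lo, hi); st.1 ++ [[st.2.1, st.2.2]])
      = acc ++ pvChunks lo hi rest := by
  induction rest with
  | nil => intro acc lo hi; simp [pvChunks]
  | cons y ys ih =>
    intro acc lo hi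
    simp only [List.foldl_cons, pvChunkStepA, pvChunks]
    by_cases h : y = hi + 1
    · rw [if_pos h, if_pos h]; exact ih acc lo y
    · rw [if_neg h, if_neg h]
      have := ih (acc ++ [[lo, hi]]) y y
      simpa [List.append_assoc] using this

-- the first chunk is [lo, e] for an e and a tail not depending on lo
theorem pvChunks_shape (t : List Int) : ∀ hi : Int, ∃ e rs, ∀ lo, pvChunks lo hi t = [lo, e] :: rs := by
  induction t with
  | nil => intro hi; exact ⟨hi, [], fun lo => rfl⟩
  | cons y ys ih =>
    intro hi
    by_cases h : y = hi + 1
    · obtain ⟨e, rs, hrs⟩ := ih y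
      refine ⟨e, rs, fun lo => ?_⟩
      show (if y = hi + 1 then pvChunks lo y ys else [lo, hi] :: pvChunks y y ys) = [lo, e] :: rs
      rw [if_pos h]; exact hrs lo
    · refine ⟨hi, pvChunks y y ys, fun lo => ?_⟩
      show (if y = hi + 1 then pvChunks lo y ys else [lo, hi] :: pvChunks y y ys) = [lo, hi] :: pvChunks y y ys
      rw [if_neg h]

-- B's boundary-zip equals pvChunks on a strictly increasing list
theorem pvZip_eq_chunks (rest : List Int) : ∀ x : Int, (x :: rest).Pairwise (· < ·) →
    List.zipWith (fun a b => [a, b])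
        ((x :: rest).filter (fun v => !((x :: rest).contains (v - 1))))
        ((x :: rest).filter (fun v => !((x :: rest).contains (v + 1))))
      = pvChunks x x rest := by
  induction rest with
  | nil =>
    intro x _
    have h1 : ¬ (x - 1 = x) := by omega
    have h2 : ¬ (x + 1 = x) := by omega
    simp [pvChunks, h1, h2]
  | cons y t ih =>
    intro x hp
    rw [List.pairwise_cons] at hp
    obtain ⟨hx, hp2⟩ := hp
    have hxy : x < y := hx y (by simp)
    have hxt : ∀ v ∈ t, x < v := fun v hv => hx v (by simp [hv])
    have hyt : ∀ v ∈ t, y < v := (List.pairwise_cons.mp hp2).1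
    -- the head x is always a range start
    have hSx : x - 1 ∉ (x :: y :: t) := by
      simp only [List.mem_cons]
      rintro (h | h | h)
      · omega
      · omega
      · exact absurd (hxt _ h) (by omega)
    by_cases hc : y = x + 1
    · subst hc
      -- x + 1 - 1 ∈ the list, so x + 1 is not a start; membership of v - 1 localizes to the tail
      have hSy : (x + 1) - 1 ∈ (x :: (x + 1) :: t) := by
        have : (x + 1) - 1 = x := by omega
        rw [this]; exact List.mem_cons_self ..
      have hstarts : (x :: (x + 1) :: t).filter (fun v => !((x :: (x + 1) :: t).contains (v - 1)))
          = x :: t.filter (fun v => !((x :: (x + 1) :: t).contains (v - 1))) := by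
        simp only [List.filter_cons]
        rw [pvPredTrue _ _ hSx, pvPredFalse _ _ hSy]
        simp
      have hcongrS : t.filter (fun v => !((x :: (x + 1) :: t).contains (v - 1)))
          = t.filter (fun v => !(((x + 1) :: t).contains (v - 1))) := by
        refine List.filter_congr (fun v hv => ?_)
        have hv1 : x + 1 < v := hyt v hv
        have : ¬ (v - 1 = x) := by omega
        simp [List.mem_cons, this]
      have hstartsR : ((x + 1) :: t).filter (fun v => !(((x + 1) :: t).contains (v - 1)))
          = (x + 1) :: t.filter (fun v => !(((x + 1) :: t).contains (v - 1))) := by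
        have hm : (x + 1) - 1 ∉ ((x + 1) :: t) := by
          simp only [List.mem_cons]
          rintro (h | h)
          · omega
          · exact absurd (hyt _ h) (by omega)
        simp only [List.filter_cons]
        rw [pvPredTrue _ _ hm]
        simp
      have hends : (x :: (x + 1) :: t).filter (fun v => !((x :: (x + 1) :: t).contains (v + 1)))
          = ((x + 1) :: t).filter (fun v => !(((x + 1) :: t).contains (v + 1))) := by
        have hm : x + 1 ∈ (x :: (x + 1) :: t) := by simp
        rw [List.filter_cons, pvPredFalse _ _ hm, if_neg (by simp)]
        refine List.filter_congr (fun v hv => ?_)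
        have hv1 : x < v := hx v hv
        have : ¬ (v + 1 = x) := by omega
        simp [List.mem_cons, this]
      have hIH := ih (x + 1) hp2
      rw [hstartsR] at hIH
      obtain ⟨e, rs, hsh⟩ := pvChunks_shape t (x + 1)
      rw [hstarts, hcongrS, hends, pvChunks, if_pos rfl, hsh x]
      rw [hsh (x + 1)] at hIH
      cases hel : ((x + 1) :: t).filter (fun v => !(((x + 1) :: t).contains (v + 1))) with
      | nil => rw [hel] at hIH; simp at hIH
      | cons e1 et =>
        rw [hel] at hIH
        simp only [List.zipWith_cons_cons] at hIH ⊢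
        obtain ⟨hh, hz⟩ := List.cons_eq_cons.mp hIH
        have he1 : e1 = e := by simpa using hh
        rw [he1, hz]
    · -- y starts a new chunk: x is a singleton range [x, x]
      have hstarts : (x :: y :: t).filter (fun v => !((x :: y :: t).contains (v - 1)))
          = x :: (y :: t).filter (fun v => !((y :: t).contains (v - 1))) := by
        rw [List.filter_cons, pvPredTrue _ _ hSx, if_pos rfl]
        congr 1
        refine List.filter_congr (fun v hv => ?_)
        have hv1 : ¬ (v - 1 = x) := by
          rcases List.mem_cons.mp hv with h | h
          · omega
          · have := hyt v h; omega
        simp [List.mem_cons, hv1]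
      have hEx : x + 1 ∉ (x :: y :: t) := by
        simp only [List.mem_cons]
        rintro (h | h | h)
        · omega
        · omega
        · exact absurd (hyt _ h) (by omega)
      have hends : (x :: y :: t).filter (fun v => !((x :: y :: t).contains (v + 1)))
          = x :: (y :: t).filter (fun v => !((y :: t).contains (v + 1))) := by
        rw [List.filter_cons, pvPredTrue _ _ hEx, if_pos rfl]
        congr 1
        refine List.filter_congr (fun v hv => ?_)
        have hv1 : ¬ (v + 1 = x) := by
          rcases List.mem_cons.mp hv with h | h
          · omega
          · have := hyt v h; omega
        simp [List.mem_cons, hv1]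
      rw [hstarts, hends, List.zipWith_cons_cons, ih y hp2, pvChunks, if_neg hc]

-- per-entry equality: A's scan value = B's boundary-zip value, on a duplicate-free lumi list
theorem pvEntry (lumis : List Int) (hnd : lumis.Nodup) (x : Int) (rest : List Int)
    (hs : PySem.List.sorted lumis (fun v => v) false = x :: rest) :
    (let st := rest.foldl pvChunkStepA ([], x, x); st.1 ++ [[st.2.1, st.2.2]])
      = List.zipWith (fun a b => [a, b])
          ((x :: rest).filter (fun v => !(lumis.contains (v - 1))))
          ((x :: rest).filter (fun v => !(lumis.contains (v + 1)))) := by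
  have hperm : (x :: rest).Perm lumis := hs ▸ PySem.List.sorted_perm ..
  have hmem : ∀ a : Int, lumis.contains a = (x :: rest).contains a := fun a => by
    simp [hperm.mem_iff]
  have hf1 : (x :: rest).filter (fun v => !(lumis.contains (v - 1)))
      = (x :: rest).filter (fun v => !((x :: rest).contains (v - 1))) :=
    List.filter_congr (fun v _ => by rw [hmem])
  have hf2 : (x :: rest).filter (fun v => !(lumis.contains (v + 1)))
      = (x :: rest).filter (fun v => !((x :: rest).contains (v + 1))) :=
    List.filter_congr (fun v _ => by rw [hmem])
  have h1 : (x :: rest).Pairwise (fun a b => a ≤ b) := by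
    have := PySem.List.sorted_pairwise (xs := lumis) (key := fun v : Int => v)
    rw [hs] at this
    exact this
  have h2 : (x :: rest).Nodup := hperm.nodup_iff.mpr hnd
  have hpw : (x :: rest).Pairwise (· < ·) :=
    (h1.and h2).imp (fun h => lt_of_le_of_ne h.1 h.2)
  rw [hf1, hf2, pvZip_eq_chunks rest x hpw]
  have := pvFoldA_eq_chunks rest [] x x
  simpa using this

-- the two loop bodies agree on a duplicate-free entry
theorem pvStep_eq (d : PySem.Dict String (List (List Int))) (p : String × List Int)
    (hnd : p.2.Nodup) : pvStepA d p = pvStepB d p := by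
  unfold pvStepA pvStepB
  by_cases hz : p.2 = []
  · rw [if_pos (by simp [hz]), if_pos hz]
  · rw [if_neg (by simp [hz]), if_neg hz]
    cases hsort : PySem.List.sorted p.2 (fun x => x) false with
    | nil => exact absurd ((PySem.List.sorted_eq_nil_iff _ _ _).mp hsort) hz
    | cons x rest =>
      exact congrArg (d.insert p.1) (pvEntry p.2 hnd x rest hsort)

-- the two folds agree entry by entry
theorem pvFold_eq (rl : List (String × List Int)) : ∀ d : PySem.Dict String (List (List Int)),
    (∀ p ∈ rl, p.2.Nodup) → rl.foldl pvStepA d = rl.foldl pvStepB d := by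
  induction rl with
  | nil => intro d _; rfl
  | cons p ps ih =>
    intro d hnd
    simp only [List.foldl_cons]
    rw [pvStep_eq d p (hnd p (List.mem_cons_self ..))]
    exact ih _ (fun q hq => hnd q (List.mem_cons_of_mem _ hq))

-- ===== VERDICT (by name: the statement is the Claim_ definition above) =====
theorem ToRunLumiRanges_spec : Claim_equal_ToRunLumiRanges := by
  unfold Claim_equal_ToRunLumiRanges
  intro rl _ hpre
  unfold Spec_ToRunLumiRanges ToRunLumiRanges ToRunLumiRanges_alt
  exact congrArg PySem.Dict.items (pvFold_eq rl PySem.Dict.empty hpre)
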